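-- pv_equiv track=rewrite | github.com/rhighs/aoc2024 | day02.py | badpos
-- ===== SOURCE A (Python) =====
-- def badpos(r):
--     i = 0
--     trend = None
--     rr = []
--     for p, n in zip(r, r[1:]):
--         inc = p < n
--         if trend is None:
--             trend = inc
--         elif trend != inc:
--             rr.append(i)
--             break
--         diff = abs(p - n)
--         if diff > 3 or diff == 0:
--             rr.append(i)
--         i += 1
--     return rr
-- ===== SOURCE B (Python) =====
-- def badpos(r):
--     if len(r) < 2:
--         return []
--     t = r[0] < r[1]
--     b = next((i for i in range(1, len(r) - 1) if (r[i] < r[i + 1]) != t), None)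
--     if b is None:
--         return [i for i in range(len(r) - 1)
--                 if abs(r[i] - r[i + 1]) > 3 or abs(r[i] - r[i + 1]) == 0]
--     return [i for i in range(b)
--             if abs(r[i] - r[i + 1]) > 3 or abs(r[i] - r[i + 1]) == 0] + [b]
-- ===== Notes on version B (the rewrite author's own statement) =====
-- stated objective: alternative
-- what changed: A's single interleaved loop with break is replaced by a two-pass decomposition: first locate the first trend-reversal index, then collect bad-diff indices in the prefix before it (or the whole pair list) with a comprehension, appending the reversal index if found.
import Mathlib
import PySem

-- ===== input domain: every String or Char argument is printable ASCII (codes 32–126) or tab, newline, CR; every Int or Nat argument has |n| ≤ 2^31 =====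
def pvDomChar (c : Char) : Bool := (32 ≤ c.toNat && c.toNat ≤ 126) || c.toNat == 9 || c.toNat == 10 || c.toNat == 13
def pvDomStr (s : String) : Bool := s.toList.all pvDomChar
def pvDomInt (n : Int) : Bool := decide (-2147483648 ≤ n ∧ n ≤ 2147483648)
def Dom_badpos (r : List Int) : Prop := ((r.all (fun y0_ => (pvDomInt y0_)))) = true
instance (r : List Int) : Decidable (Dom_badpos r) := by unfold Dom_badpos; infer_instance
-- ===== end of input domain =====

-- B replaces A's single interleaved loop-with-break by a locate-reversal-then-filter two-pass decomposition (same O(n) cost).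


-- ===== PORT A =====
-- A's for-loop over zip(r, r[1:]) with state (i, trend, rr); break = returning rr ++ [i].
def pvALoop (pairs : List (Int × Int)) (i : Int) (trend : Option Bool) (rr : List Int) : List Int :=
  match pairs with
  | [] => rr
  | (p, n) :: rest =>
    let inc := decide (p < n)
    match trend with
    | none =>
        let rr' := if |p - n| > 3 ∨ |p - n| = 0 then rr ++ [i] else rr
        pvALoop rest (i + 1) (some inc) rr'
    | some t =>
        if t ≠ inc then rr ++ [i]
        else
          let rr' := if |p - n| > 3 ∨ |p - n| = 0 then rr ++ [i] else rr
          pvALoop rest (i + 1) (some t) rr'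

-- zip(r, r[1:]) = List.zip r (r.drop 1) (the slice r[1:] is exactly drop 1)
def badpos (r : List Int) : List Int :=
  pvALoop (List.zip r (r.drop 1)) 0 none []

-- ===== PORT B =====
-- Source B's `next((i for i in range(1, len(r)-1) if (r[i] < r[i+1]) != t), None)`:
-- scan of the adjacent pairs from index 1 for the first direction differing from t.
def pvFindRev (ps : List (Int × Int)) (t : Bool) (k : Nat) : Option Nat :=
  match ps with
  | [] => none
  | (p, n) :: rest => if decide (p < n) ≠ t then some k else pvFindRev rest t (k + 1)

-- Source B's comprehension `[i for i in range(…) if abs(r[i]-r[i+1]) > 3 or abs(r[i]-r[i+1]) == 0]`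
def pvBadIdx (ps : List (Int × Int)) (k : Int) : List Int :=
  match ps with
  | [] => []
  | (p, n) :: rest => (if |p - n| > 3 ∨ |p - n| = 0 then [k] else []) ++ pvBadIdx rest (k + 1)

def badpos_alt (r : List Int) : List Int :=
  match r with
  | [] => []
  | [_] => []
  | a :: b :: rest2 =>
    let ps' := List.zip (b :: rest2) rest2
    let ps := (a, b) :: ps'          -- the adjacent pairs of r
    let t := decide (a < b)
    match pvFindRev ps' t 1 with
    | some bi => pvBadIdx (ps.take bi) 0 ++ [(bi : Int)]
    | none => pvBadIdx ps 0

-- ===== PRECONDITION & SPEC =====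
def Spec_badpos (r : List Int) (out : List Int) : Prop := out = badpos_alt r
instance (r : List Int) (out : List Int) : Decidable (Spec_badpos r out) := by unfold Spec_badpos; infer_instance

-- ===== CLAIM (what is proved, stated in full; the proofs are below) =====
def Claim_equal_badpos : Prop := ∀ (r : List Int), Dom_badpos r → Spec_badpos r (badpos r)

-- ===== LEMMAS AND PROOFS =====

-- what A's loop produces once the trend is fixed: bad-diff indices up to (and including) the first reversal
def pvBadUntil (ps : List (Int × Int)) (t : Bool) (k : Int) : List Int :=
  match ps with
  | [] => []
  | (p, n) :: rest =>
    if t ≠ decide (p < n) then [k]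
    else (if |p - n| > 3 ∨ |p - n| = 0 then [k] else []) ++ pvBadUntil rest t (k + 1)

theorem pvALoop_badUntil (t : Bool) :
    ∀ (ps : List (Int × Int)) (k : Int) (rr : List Int),
      pvALoop ps k (some t) rr = rr ++ pvBadUntil ps t k := by
  intro ps
  induction ps with
  | nil => intro k rr; simp [pvALoop, pvBadUntil]
  | cons hd tl ih =>
    intro k rr
    obtain ⟨p, n⟩ := hd
    simp only [pvALoop, pvBadUntil]
    by_cases hrev : t ≠ decide (p < n)
    · simp [hrev]
    · simp only [if_neg hrev]
      rw [ih]
      split_ifs <;> simp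

theorem pvFindRev_ge (ps : List (Int × Int)) (t : Bool) :
    ∀ (m b : Nat), pvFindRev ps t m = some b → m ≤ b := by
  induction ps with
  | nil => intro m b h; simp [pvFindRev] at h
  | cons hd tl ih =>
    intro m b h
    obtain ⟨p, n⟩ := hd
    simp only [pvFindRev] at h
    split at h
    · simp at h; omega
    · have := ih (m + 1) b h; omega

theorem pvBadUntil_eq (t : Bool) :
    ∀ (ps : List (Int × Int)) (m : Nat),
      pvBadUntil ps t (m : Int) =
        match pvFindRev ps t m with
        | some b => pvBadIdx (ps.take (b - m)) (m : Int) ++ [(b : Int)]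
        | none => pvBadIdx ps (m : Int) := by
  intro ps
  induction ps with
  | nil => intro m; simp [pvBadUntil, pvFindRev, pvBadIdx]
  | cons hd tl ih =>
    intro m
    obtain ⟨p, n⟩ := hd
    by_cases hrev : decide (p < n) ≠ t
    · have ht : t ≠ decide (p < n) := fun h => hrev h.symm
      simp [pvBadUntil, pvFindRev, hrev, ht, pvBadIdx]
    · have ht : ¬ (t ≠ decide (p < n)) := fun h => hrev fun h2 => h h2.symm
      simp only [pvBadUntil, pvFindRev, if_neg hrev, if_neg ht]
      rcases hfind : pvFindRev tl t (m + 1) with _ | b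
      · have h2 : pvBadUntil tl t (((m + 1 : Nat) : Int)) = pvBadIdx tl (((m + 1 : Nat) : Int)) := by
          rw [ih (m + 1), hfind]
        push_cast at h2
        simp only [pvBadIdx]
        rw [h2]
      · have hge : m + 1 ≤ b := pvFindRev_ge tl t (m + 1) b hfind
        have h2 : pvBadUntil tl t (((m + 1 : Nat) : Int)) =
            pvBadIdx (tl.take (b - (m + 1))) (((m + 1 : Nat) : Int)) ++ [(b : Int)] := by
          rw [ih (m + 1), hfind]
        push_cast at h2
        have htake : b - m = (b - (m + 1)) + 1 := by omega
        simp only [htake, List.take_succ_cons, pvBadIdx]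
        rw [h2, List.append_assoc]

-- ===== VERDICT (by name: the statement is the Claim_ definition above) =====
theorem badpos_spec : Claim_equal_badpos := by
  intro r _
  unfold Spec_badpos
  match r with
  | [] => rfl
  | [_] => rfl
  | a :: b :: rest2 =>
    simp only [badpos, badpos_alt, List.drop, List.zip]
    have hz : List.zipWith Prod.mk (a :: b :: rest2) (b :: rest2) =
        (a, b) :: List.zipWith Prod.mk (b :: rest2) rest2 := rfl
    rw [hz]
    set t := decide (a < b) with ht
    set ps' := List.zipWith Prod.mk (b :: rest2) rest2 with hps
    simp only [pvALoop]
    rw [show (0 : Int) + 1 = 1 from rfl, ← ht]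
    rw [pvALoop_badUntil t ps' 1]
    have key := pvBadUntil_eq t ps' 1
    norm_num at key
    rw [key]
    rcases hfind : pvFindRev ps' t 1 with _ | bi
    · simp only [pvBadIdx]
      rfl
    · have hge : 1 ≤ bi := pvFindRev_ge ps' t 1 bi hfind
      have htake : ((a, b) :: ps').take bi = (a, b) :: ps'.take (bi - 1) := by
        rcases bi with _ | bi'
        · omega
        · simp
      simp only [htake, pvBadIdx]
      split_ifs <;> simp
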